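-- pv_equiv track=rewrite | github.com/huberste/adventofcode | 2017/day24/day24.py | strengthenBridge
-- ===== SOURCE A (Python) =====
-- def bridgeStrength(bridge):
--     result = 0
--     for part in bridge:
--         for connector in part:
--             result += connector
--     return result
--
-- def freeConnector(bridge):
--     result = 0
--     connectors = {}
--     for part in bridge:
--         for connector in part:
--             if connector in connectors:
--                 connectors[connector] += 1
--             else:
--                 connectors[connector] = 1
--     for connector in connectors:
--         if (connector != 0) and (connectors[connector] % 2 != 0):
--             result = connector
--             break
--     return result
--
-- def strengthenBridge(bridge, parts):
--     strongest = bridgeStrength(bridge)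
--     strongestBridge = bridge
--     free = freeConnector(bridge)
--     for part in parts:
--         if free in part:
--             newparts = list(parts)
--             newparts.remove(part)
--             newbridge = list(bridge)
--             newbridge.append(part)
--             testbridge = strengthenBridge(newbridge, newparts)
--             strength = bridgeStrength(testbridge)
--             if strength > strongest:
--                 strongestBridge = list(testbridge)
--                 strongest = strength
--     return strongestBridge
-- ===== SOURCE B (Python) =====
-- # B: one-pass DFS that threads the running best through the search, maintaining the
-- # bridge strength and the connector counter incrementally (backtracking) instead of
-- # recomputing bridgeStrength and rebuilding the connector dict from the whole bridge
-- # at every recursive call, and comparing each candidate bridge once in preorder.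
--
-- def _free(counts):
--     for c in counts:
--         if c != 0 and counts[c] % 2 != 0:
--             return c
--     return 0
--
-- def _dfs(parts, strength, counts, path, best):
--     f = _free(counts)
--     for part in parts:
--         a, b = part
--         if f == a or f == b:
--             ns = strength + a + b
--             path.append(part)
--             added = []
--             for c in (a, b):
--                 if c in counts:
--                     counts[c] += 1
--                 else:
--                     counts[c] = 1
--                     added.append(c)
--             if ns > best[0]:
--                 best[0] = ns
--                 best[1] = list(path)
--             rest = list(parts)
--             rest.remove(part)
--             _dfs(rest, ns, counts, path, best)
--             for c in (a, b):
--                 counts[c] -= 1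
--                 if counts[c] == 0:
--                     del counts[c]
--             path.pop()
--
-- def strengthenBridge(bridge, parts):
--     strength = 0
--     counts = {}
--     for a, b in bridge:
--         strength += a + b
--         for c in (a, b):
--             counts[c] = counts.get(c, 0) + 1
--     best = [strength, list(bridge)]
--     _dfs(list(parts), strength, counts, list(bridge), best)
--     return best[1]
-- ===== Notes on version B (the rewrite author's own statement) =====
-- stated objective: faster
-- what changed: A re-walks the whole growing bridge at every recursive call (rebuilding the connector-count dict for freeConnector, recomputing bridgeStrength of each returned candidate) and compares child results bottom-up; B does a single DFS that threads the running best through the search in preorder, maintaining the bridge strength and the connector counter incrementally with backtracking.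
import Mathlib
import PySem

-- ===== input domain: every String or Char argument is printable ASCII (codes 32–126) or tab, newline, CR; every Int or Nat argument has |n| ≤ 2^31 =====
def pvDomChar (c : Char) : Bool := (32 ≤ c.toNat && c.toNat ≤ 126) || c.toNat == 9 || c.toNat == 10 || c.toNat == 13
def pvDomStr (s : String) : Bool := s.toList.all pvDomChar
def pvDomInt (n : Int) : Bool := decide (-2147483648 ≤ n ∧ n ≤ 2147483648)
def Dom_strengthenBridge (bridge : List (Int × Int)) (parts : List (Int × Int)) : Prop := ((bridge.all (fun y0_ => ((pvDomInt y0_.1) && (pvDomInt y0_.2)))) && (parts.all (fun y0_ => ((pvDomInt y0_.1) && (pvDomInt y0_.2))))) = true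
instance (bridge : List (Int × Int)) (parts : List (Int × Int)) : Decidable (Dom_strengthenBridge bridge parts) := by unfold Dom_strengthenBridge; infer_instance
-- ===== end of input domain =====

-- B replaces A's recursion — which rebuilds the connector-count dict and recomputes bridge
-- strengths from the whole growing bridge at every node — by one DFS that threads the running
-- best and maintains the strength and the connector counter incrementally (objective: faster).

-- ===== PORT A =====
def bridgeStrength (bridge : List (Int × Int)) : Int :=
  bridge.foldl (fun result part => result + part.1 + part.2) 0

-- A's dict update: `if connector in connectors: connectors[connector] += 1 else: connectors[connector] = 1`
def fcUpd (d : PySem.Dict Int Int) (c : Int) : PySem.Dict Int Int :=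
  match PySem.Dict.get? d c with
  | some v => PySem.Dict.insert d c (v + 1)
  | none => PySem.Dict.insert d c 1

def fcCounts (bridge : List (Int × Int)) : PySem.Dict Int Int :=
  bridge.foldl (fun connectors part => fcUpd (fcUpd connectors part.1) part.2) PySem.Dict.empty

def freeConnector (bridge : List (Int × Int)) : Int :=
  let connectors := fcCounts bridge
  -- `for connector in connectors: if connector != 0 and connectors[connector] % 2 != 0: result = connector; break`
  match (PySem.Dict.keys connectors).find?
      (fun c => c != 0 && PySem.Int.mod (PySem.Dict.getD connectors c 0) 2 != 0) with
  | some c => c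
  | none => 0

-- fuel = recursion depth bound (each call removes one part); `parts.length + 1` always suffices
def sbFuel : Nat → List (Int × Int) → List (Int × Int) → List (Int × Int)
  | 0, bridge, _ => bridge
  | fuel + 1, bridge, parts =>
    let strongest := bridgeStrength bridge
    let free := freeConnector bridge
    (parts.foldl (fun (st : Int × List (Int × Int)) part =>
      if free = part.1 ∨ free = part.2 then
        let newparts := (PySem.List.remove? parts part).getD parts
        let newbridge := bridge ++ [part]
        let testbridge := sbFuel fuel newbridge newparts
        let strength := bridgeStrength testbridge
        if strength > st.1 then (strength, testbridge) else st
      else st) (strongest, bridge)).2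

def strengthenBridge (bridge : List (Int × Int)) (parts : List (Int × Int)) : List (Int × Int) :=
  sbFuel (parts.length + 1) bridge parts

-- ===== PORT B =====
-- B's counter update: `counts[c] = counts.get(c, 0) + 1`
def bump (d : PySem.Dict Int Int) (c : Int) : PySem.Dict Int Int :=
  PySem.Dict.insert d c (PySem.Dict.getD d c 0 + 1)

-- `_free(counts)`: scan the keys in insertion order, early return
def freeScan (ks : List Int) (counts : PySem.Dict Int Int) : Int :=
  match ks with
  | [] => 0
  | c :: rest =>
    if c != 0 && PySem.Int.mod (PySem.Dict.getD counts c 0) 2 != 0 then c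
    else freeScan rest counts

-- `_dfs`: the loop over `parts` (todo = parts not yet tried at this node); the pure threading of
-- (counts, path, best) is Source B's mutate-recurse-restore backtracking; fuel bounds the depth.
def dfsLoop : Nat → List (Int × Int) → List (Int × Int) → Int → Int → PySem.Dict Int Int →
    List (Int × Int) → Int × List (Int × Int) → Int × List (Int × Int)
  | _, [], _, _, _, _, _, best => best
  | fuel, part :: todo, parts, f, strength, counts, path, best =>
    if f = part.1 ∨ f = part.2 then
      match fuel with
      | 0 => best -- fuel guard; never reached when fuel ≥ parts.length
      | fuel' + 1 =>
        let ns := strength + part.1 + part.2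
        let npath := path ++ [part]
        let ncounts := bump (bump counts part.1) part.2
        let best1 := if ns > best.1 then (ns, npath) else best
        let rest := (PySem.List.remove? parts part).getD parts
        let best2 := dfsLoop fuel' rest rest (freeScan (PySem.Dict.keys ncounts) ncounts) ns ncounts npath best1
        dfsLoop (fuel' + 1) todo parts f strength counts path best2
    else dfsLoop fuel todo parts f strength counts path best
  termination_by fuel todo => (fuel, todo.length)

def strengthenBridge_alt (bridge : List (Int × Int)) (parts : List (Int × Int)) : List (Int × Int) :=
  let init := bridge.foldl
    (fun (st : Int × PySem.Dict Int Int) part =>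
      (st.1 + part.1 + part.2, bump (bump st.2 part.1) part.2)) (0, PySem.Dict.empty)
  (dfsLoop parts.length parts parts (freeScan (PySem.Dict.keys init.2) init.2) init.1 init.2
      bridge (init.1, bridge)).2

-- ===== PRECONDITION & SPEC =====
def Spec_strengthenBridge (bridge : List (Int × Int)) (parts : List (Int × Int)) (out : List (Int × Int)) : Prop := out = strengthenBridge_alt bridge parts
instance (bridge : List (Int × Int)) (parts : List (Int × Int)) (out : List (Int × Int)) : Decidable (Spec_strengthenBridge bridge parts out) := by unfold Spec_strengthenBridge; infer_instance

-- ===== CLAIM (what is proved, stated in full; the proofs are below) =====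
def Claim_equal_strengthenBridge : Prop := ∀ (bridge : List (Int × Int)) (parts : List (Int × Int)), Dom_strengthenBridge bridge parts → Spec_strengthenBridge bridge parts (strengthenBridge bridge parts)

-- ===== LEMMAS AND PROOFS =====

-- "keep the first strictly stronger" combination step shared by both searches
def pvStep (acc x : Int × List (Int × Int)) : Int × List (Int × Int) :=
  if x.1 > acc.1 then x else acc

-- B's counter of a bridge
def countsB (bridge : List (Int × Int)) : PySem.Dict Int Int :=
  bridge.foldl (fun d part => bump (bump d part.1) part.2) PySem.Dict.empty

-- A's search, reformulated as returning the (strength, bridge) pair it folds over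
def AP : Nat → List (Int × Int) → List (Int × Int) → Int × List (Int × Int)
  | 0, bridge, _ => (bridgeStrength bridge, bridge)
  | fuel + 1, bridge, parts =>
    parts.foldl (fun st part =>
      if freeConnector bridge = part.1 ∨ freeConnector bridge = part.2 then
        pvStep st (AP fuel (bridge ++ [part]) ((PySem.List.remove? parts part).getD parts))
      else st) (bridgeStrength bridge, bridge)

theorem fcUpd_eq_bump (d : PySem.Dict Int Int) (c : Int) : fcUpd d c = bump d c := by
  cases h : PySem.Dict.get? d c <;>
    simp [fcUpd, bump, PySem.Dict.getD_eq_get?_getD, h]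

theorem fcCounts_eq_countsB (bridge : List (Int × Int)) : fcCounts bridge = countsB bridge := by
  unfold fcCounts countsB
  rw [show fcUpd = bump from funext fun d => funext fun c => fcUpd_eq_bump d c]

theorem countsB_append (bridge : List (Int × Int)) (part : Int × Int) :
    countsB (bridge ++ [part]) = bump (bump (countsB bridge) part.1) part.2 := by
  simp [countsB, List.foldl_append]

theorem bridgeStrength_append (bridge : List (Int × Int)) (part : Int × Int) :
    bridgeStrength (bridge ++ [part]) = bridgeStrength bridge + part.1 + part.2 := by
  simp [bridgeStrength, List.foldl_append]

theorem freeConnector_eq_freeScan (bridge : List (Int × Int)) :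
    freeConnector bridge = freeScan (PySem.Dict.keys (countsB bridge)) (countsB bridge) := by
  have aux : ∀ (ks : List Int) (d : PySem.Dict Int Int),
      (match ks.find? (fun c => c != 0 && PySem.Int.mod (PySem.Dict.getD d c 0) 2 != 0) with
       | some c => c
       | none => 0) = freeScan ks d := by
    intro ks d
    induction ks with
    | nil => rfl
    | cons c rest ih =>
      rw [List.find?_cons]
      cases h : (c != 0 && PySem.Int.mod (PySem.Dict.getD d c 0) 2 != 0) <;>
        simp only [freeScan, h, if_true, if_false, Bool.false_eq_true, ih]
  rw [freeConnector, fcCounts_eq_countsB]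
  exact aux _ _

theorem pvStep_assoc (a b c : Int × List (Int × Int)) :
    pvStep (pvStep a b) c = pvStep a (pvStep b c) := by
  simp only [pvStep]
  split_ifs <;> first | rfl | omega

-- pushing an initial pvStep out of a guarded fold
theorem foldl_guard_push (c : Int × Int → Prop) [DecidablePred c] (g : Int × Int → Int × List (Int × Int))
    (l : List (Int × Int)) (a h : Int × List (Int × Int)) :
    l.foldl (fun st p => if c p then pvStep st (g p) else st) (pvStep a h)
      = pvStep a (l.foldl (fun st p => if c p then pvStep st (g p) else st) h) := by
  induction l generalizing h with
  | nil => rfl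
  | cons p l ih =>
    simp only [List.foldl_cons]
    by_cases hc : c p
    · rw [if_pos hc, if_pos hc, pvStep_assoc, ih]
    · rw [if_neg hc, if_neg hc, ih]

theorem AP_fst (fuel : Nat) (bridge parts : List (Int × Int)) :
    (AP fuel bridge parts).1 = bridgeStrength (AP fuel bridge parts).2 := by
  induction fuel generalizing bridge parts with
  | zero => rfl
  | succ fuel ih =>
    simp only [AP]
    have aux : ∀ (l : List (Int × Int)) (st : Int × List (Int × Int)),
        st.1 = bridgeStrength st.2 →
        ((l.foldl (fun st part =>
            if freeConnector bridge = part.1 ∨ freeConnector bridge = part.2 then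
              pvStep st (AP fuel (bridge ++ [part]) ((PySem.List.remove? parts part).getD parts))
            else st) st).1
          = bridgeStrength ((l.foldl (fun st part =>
            if freeConnector bridge = part.1 ∨ freeConnector bridge = part.2 then
              pvStep st (AP fuel (bridge ++ [part]) ((PySem.List.remove? parts part).getD parts))
            else st) st).2)) := by
      intro l
      induction l with
      | nil => intro st hst; exact hst
      | cons p l ihl =>
        intro st hst
        simp only [List.foldl_cons]
        apply ihl
        by_cases hc : freeConnector bridge = p.1 ∨ freeConnector bridge = p.2
        · rw [if_pos hc]
          simp only [pvStep]
          split_ifs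
          · exact ih _ _
          · exact hst
        · rw [if_neg hc]; exact hst
    exact aux parts _ rfl

theorem sbFuel_eq_AP (fuel : Nat) (bridge parts : List (Int × Int)) :
    sbFuel fuel bridge parts = (AP fuel bridge parts).2 := by
  induction fuel generalizing bridge parts with
  | zero => rfl
  | succ fuel ih =>
    simp only [sbFuel, AP]
    congr 1
    have aux : ∀ (l : List (Int × Int)) (st : Int × List (Int × Int)),
        l.foldl (fun st part =>
          if freeConnector bridge = part.1 ∨ freeConnector bridge = part.2 then
            let newparts := (PySem.List.remove? parts part).getD parts
            let newbridge := bridge ++ [part]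
            let testbridge := sbFuel fuel newbridge newparts
            let strength := bridgeStrength testbridge
            if strength > st.1 then (strength, testbridge) else st
          else st) st
        = l.foldl (fun st part =>
            if freeConnector bridge = part.1 ∨ freeConnector bridge = part.2 then
              pvStep st (AP fuel (bridge ++ [part]) ((PySem.List.remove? parts part).getD parts))
            else st) st := by
      intro l
      induction l with
      | nil => intro st; rfl
      | cons p l ihl =>
        intro st
        simp only [List.foldl_cons]
        rw [ihl]
        by_cases hc : freeConnector bridge = p.1 ∨ freeConnector bridge = p.2
        · rw [if_pos hc, if_pos hc]
          congr 1
          simp only [pvStep, ih, ← AP_fst, Prod.mk.eta]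
        · rw [if_neg hc, if_neg hc]
    exact aux parts _


theorem dfsLoop_eq (fuel : Nat) : ∀ (todo parts bridge : List (Int × Int)) (best : Int × List (Int × Int)),
    (∀ p ∈ todo, p ∈ parts) → parts.length ≤ fuel →
    dfsLoop fuel todo parts (freeConnector bridge) (bridgeStrength bridge) (countsB bridge) bridge best
      = todo.foldl (fun st part =>
          if freeConnector bridge = part.1 ∨ freeConnector bridge = part.2 then
            pvStep st (AP parts.length (bridge ++ [part]) ((PySem.List.remove? parts part).getD parts))
          else st) best := by
  induction fuel using Nat.strong_induction_on with
  | _ fuel SIH =>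
    intro todo
    induction todo with
    | nil => intro parts bridge best hsub hlen; simp only [dfsLoop, List.foldl_nil]
    | cons part rest ih =>
      intro parts bridge best hsub hlen
      have hp : part ∈ parts := hsub part (by simp)
      have hrest : ∀ p ∈ rest, p ∈ parts := fun p hp' => hsub p (by simp [hp'])
      have hpos : 1 ≤ parts.length := List.length_pos_of_mem hp
      obtain ⟨fuel', rfl⟩ : ∃ f', fuel = f' + 1 := ⟨fuel - 1, by omega⟩
      simp only [dfsLoop, List.foldl_cons]
      by_cases hc : freeConnector bridge = part.1 ∨ freeConnector bridge = part.2
      · rw [if_pos hc, if_pos hc]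
        -- the parts list with the chosen part removed
        have hrem : (PySem.List.remove? parts part).getD parts = parts.erase part := by
          rw [PySem.List.remove?_eq_some_erase parts part hp]; rfl
        have hlen' : (parts.erase part).length + 1 = parts.length := by
          rw [List.length_erase_of_mem hp]; omega
        -- the child state is exactly the state of the extended bridge
        rw [show bump (bump (countsB bridge) part.1) part.2 = countsB (bridge ++ [part]) from
              (countsB_append bridge part).symm,
            ← freeConnector_eq_freeScan,
            show bridgeStrength bridge + part.1 + part.2 = bridgeStrength (bridge ++ [part]) from
              (bridgeStrength_append bridge part).symm, hrem]
        -- evaluate the child call with the strong induction hypothesis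
        rw [SIH fuel' (by omega) (parts.erase part) (parts.erase part) (bridge ++ [part]) _
              (fun p hp' => hp') (by omega)]
        -- the child fold, pushed past its own-node seed, is A's child search result
        have hAP : AP parts.length (bridge ++ [part]) (parts.erase part)
            = (parts.erase part).foldl (fun st p =>
                if freeConnector (bridge ++ [part]) = p.1 ∨ freeConnector (bridge ++ [part]) = p.2 then
                  pvStep st (AP (parts.erase part).length ((bridge ++ [part]) ++ [p])
                    ((PySem.List.remove? (parts.erase part) p).getD (parts.erase part)))
                else st) (bridgeStrength (bridge ++ [part]), bridge ++ [part]) := by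
          rw [← hlen']; rfl
        rw [show (if bridgeStrength (bridge ++ [part]) > best.1
                then (bridgeStrength (bridge ++ [part]), bridge ++ [part]) else best)
              = pvStep best (bridgeStrength (bridge ++ [part]), bridge ++ [part]) from rfl,
            foldl_guard_push, ← hAP]
        exact ih parts bridge _ hrest hlen
      · rw [if_neg hc, if_neg hc]
        exact ih parts bridge best hrest hlen

-- ===== VERDICT (by name: the statement is the Claim_ definition above) =====
theorem strengthenBridge_spec : Claim_equal_strengthenBridge := by
  intro bridge parts _hdom
  show strengthenBridge bridge parts = strengthenBridge_alt bridge parts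
  simp only [strengthenBridge, strengthenBridge_alt]
  rw [PySem.List.foldl_prod_mk (f := fun s (e : Int × Int) => s + e.1 + e.2)
        (g := fun d (e : Int × Int) => bump (bump d e.1) e.2)]
  rw [show (List.foldl (fun s (e : Int × Int) => s + e.1 + e.2) 0 bridge : Int)
        = bridgeStrength bridge from rfl,
      show List.foldl (fun d (e : Int × Int) => bump (bump d e.1) e.2) PySem.Dict.empty bridge
        = countsB bridge from rfl,
      ← freeConnector_eq_freeScan,
      dfsLoop_eq parts.length parts parts bridge _ (fun p hp => hp) le_rfl,
      sbFuel_eq_AP]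
  rfl
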